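-- pv_equiv track=rewrite | github.com/200-shetty/bookmarking_ocr_app | code/helper.py | calculate_cascading_assignments
-- ===== SOURCE A (Python) =====
-- def calculate_cascading_assignments(page_assignments, total_pages):
--     """Helper for bookmark_handler to calculate page assignments with cascading logic"""
--     cascaded_assignments = {}
--
--     if not page_assignments:
--         return {}
--
--     # Sort assignment points by page number
--     assignment_points = sorted(page_assignments.items())
--
--     # Add default starting point if first assignment isn't page 1
--     if assignment_points[0][0] > 1:
--         assignment_points.insert(0, (1, {"type": "Index", "number": "", "custom_name": ""}))
--
--     # Apply cascading logic
--     for i, (page_num, assignment) in enumerate(assignment_points):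
--         # Determine end page for this assignment
--         end_page = assignment_points[i + 1][0] - 1 if i < len(assignment_points) - 1 else total_pages
--
--         # Apply assignment to all pages in range
--         for page in range(page_num, end_page + 1):
--             cascaded_assignments[page] = assignment.copy()
--
--     return cascaded_assignments
-- ===== SOURCE B (Python) =====
-- def calculate_cascading_assignments(page_assignments, total_pages):
--     """Helper for bookmark_handler to calculate page assignments with cascading logic"""
--     if not page_assignments:
--         return {}
--
--     points = sorted(page_assignments.items())
--     if points[0][0] > 1:
--         points.insert(0, (1, {"type": "Index", "number": "", "custom_name": ""}))
--
--     # Build the page blocks back-to-front: walk the points in reverse, carrying the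
--     # start of the following interval instead of peeking at points[i + 1].
--     blocks = []
--     nxt = total_pages + 1
--     for page_num, assignment in reversed(points):
--         blocks.append([(page, assignment.copy()) for page in range(page_num, nxt)])
--         nxt = page_num
--     blocks.reverse()
--     return dict(pair for block in blocks for pair in block)
-- ===== Notes on version B (the rewrite author's own statement) =====
-- stated objective: alternative
-- what changed: Instead of A's indexed loop that peeks at assignment_points[i+1] to compute each interval's end and inserts into a dict page by page, B walks the sorted points in reverse, carrying the next interval's start in a single variable and building the page list back-to-front by prepending each block, then makes the dict once at the end.
import Mathlib
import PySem

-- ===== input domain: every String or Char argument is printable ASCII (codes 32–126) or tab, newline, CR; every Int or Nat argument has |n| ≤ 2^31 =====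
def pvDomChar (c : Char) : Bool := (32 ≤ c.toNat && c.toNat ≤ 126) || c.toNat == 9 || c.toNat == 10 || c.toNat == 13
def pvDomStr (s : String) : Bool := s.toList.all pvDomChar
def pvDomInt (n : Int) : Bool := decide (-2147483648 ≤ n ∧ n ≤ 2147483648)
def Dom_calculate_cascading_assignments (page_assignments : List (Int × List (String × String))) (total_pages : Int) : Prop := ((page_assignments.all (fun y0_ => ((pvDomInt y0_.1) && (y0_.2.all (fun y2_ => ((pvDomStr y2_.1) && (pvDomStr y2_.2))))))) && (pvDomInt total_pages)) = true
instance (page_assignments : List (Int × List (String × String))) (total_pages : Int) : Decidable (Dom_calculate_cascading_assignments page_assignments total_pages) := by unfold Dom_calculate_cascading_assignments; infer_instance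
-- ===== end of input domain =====

-- B builds the cascaded pages back-to-front, walking the sorted points in reverse and carrying
-- the next interval's start, instead of A's indexed loop peeking at points[i+1] (objective: alternative).

-- ===== PORT A =====
-- the default assignment dict {"type": "Index", "number": "", "custom_name": ""}
def pvDefaultAssignment : List (String × String) :=
  [("type", "Index"), ("number", ""), ("custom_name", "")]

def calculate_cascading_assignments (page_assignments : List (Int × List (String × String))) (total_pages : Int) : List (Int × List (String × String)) :=
  if page_assignments = [] then []
  else
    -- sorted(page_assignments.items()): dict keys are unique, so Python's tuple order only reads the page number
    let assignment_points := PySem.List.sorted page_assignments (fun p => p.1)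
    let assignment_points :=
      if (PySem.List.pyGetD assignment_points 0 ((0 : Int), [])).1 > 1 then
        -- assignment_points[0] exists here (nonempty list), so pyGetD's default is never used
        PySem.List.insert assignment_points 0 ((1 : Int), pvDefaultAssignment)
      else assignment_points
    let cascaded := (PySem.List.enumerate assignment_points 0).foldl
      (fun (d : PySem.Dict Int (List (String × String))) ip =>
        let end_page : Int :=
          if ip.1 < (assignment_points.length : Int) - 1 then
            -- assignment_points[i+1] is in range under the guard, so pyGetD's default is never used
            (PySem.List.pyGetD assignment_points (ip.1 + 1) ((0 : Int), [])).1 - 1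
          else total_pages
        (PySem.List.pyRange ip.2.1 (end_page + 1) 1).foldl
          (fun d page => d.insert page ip.2.2) d)
      PySem.Dict.empty
    cascaded.items

-- ===== PORT B =====
def calculate_cascading_assignments_alt (page_assignments : List (Int × List (String × String))) (total_pages : Int) : List (Int × List (String × String)) :=
  if page_assignments = [] then []
  else
    let points := PySem.List.sorted page_assignments (fun p => p.1)
    let points :=
      if (PySem.List.pyGetD points 0 ((0 : Int), [])).1 > 1 then
        PySem.List.insert points 0 ((1 : Int), pvDefaultAssignment)
      else points
    -- for page_num, assignment in reversed(points): append the block, carry nxt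
    let st := points.reverse.foldl
      (fun (st : Int × List (List (Int × List (String × String)))) pa =>
        (pa.1, st.2 ++ [(PySem.List.pyRange pa.1 st.1 1).map (fun page => (page, pa.2))]))
      (total_pages + 1, ([] : List (List (Int × List (String × String)))))
    let blocks := st.2.reverse
    (PySem.Dict.ofList blocks.flatten).items

-- ===== PRECONDITION & SPEC =====
def Spec_calculate_cascading_assignments (page_assignments : List (Int × List (String × String))) (total_pages : Int) (out : List (Int × List (String × String))) : Prop := out = calculate_cascading_assignments_alt page_assignments total_pages
instance (page_assignments : List (Int × List (String × String))) (total_pages : Int) (out : List (Int × List (String × String))) : Decidable (Spec_calculate_cascading_assignments page_assignments total_pages out) := by unfold Spec_calculate_cascading_assignments; infer_instance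

-- ===== CLAIM (what is proved, stated in full; the proofs are below) =====
def Claim_equal_calculate_cascading_assignments : Prop := ∀ (page_assignments : List (Int × List (String × String))) (total_pages : Int), Dom_calculate_cascading_assignments page_assignments total_pages → Spec_calculate_cascading_assignments page_assignments total_pages (calculate_cascading_assignments page_assignments total_pages)

-- ===== LEMMAS AND PROOFS =====

-- start of the interval following the first point of `pts` (total_pages + 1 after the last point)
def pvHeadKey (pts : List (Int × List (String × String))) (total_pages : Int) : Int :=
  match pts with
  | [] => total_pages + 1
  | (q, _) :: _ => q

-- the cascaded page list both programs produce, one block per point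
def pvBlocks (pts : List (Int × List (String × String))) (total_pages : Int) : List (Int × List (String × String)) :=
  match pts with
  | [] => []
  | (p, a) :: rest =>
      (PySem.List.pyRange p (pvHeadKey rest total_pages) 1).map (fun page => (page, a))
        ++ pvBlocks rest total_pages

-- the block of each point, in point order
def pvBlockList (pts : List (Int × List (String × String))) (total_pages : Int) : List (List (Int × List (String × String))) :=
  match pts with
  | [] => []
  | (p, a) :: rest =>
      (PySem.List.pyRange p (pvHeadKey rest total_pages) 1).map (fun page => (page, a))
        :: pvBlockList rest total_pages

theorem pvBlockList_flatten (pts : List (Int × List (String × String))) (total_pages : Int) :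
    (pvBlockList pts total_pages).flatten = pvBlocks pts total_pages := by
  induction pts with
  | nil => simp [pvBlockList, pvBlocks]
  | cons x rest ih =>
      obtain ⟨p, a⟩ := x
      simp [pvBlockList, pvBlocks, ih]

-- B's reverse fold computes (head key, blocks in reverse point order)
theorem pvB_fold (pts : List (Int × List (String × String))) (total_pages : Int) :
    pts.reverse.foldl
      (fun (st : Int × List (List (Int × List (String × String)))) pa =>
        (pa.1, st.2 ++ [(PySem.List.pyRange pa.1 st.1 1).map (fun page => (page, pa.2))]))
      (total_pages + 1, ([] : List (List (Int × List (String × String)))))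
    = (pvHeadKey pts total_pages, (pvBlockList pts total_pages).reverse) := by
  induction pts with
  | nil => simp [pvHeadKey, pvBlockList]
  | cons x rest ih =>
      obtain ⟨p, a⟩ := x
      simp only [List.reverse_cons, List.foldl_append, List.foldl_cons, List.foldl_nil, ih]
      simp [pvHeadKey, pvBlockList]

-- A's nested insert loop, written as structural recursion on the point list
def pvFoldIns (pts : List (Int × List (String × String))) (total_pages : Int)
    (d : PySem.Dict Int (List (String × String))) : PySem.Dict Int (List (String × String)) :=
  match pts with
  | [] => d
  | (p, a) :: rest =>
      pvFoldIns rest total_pages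
        ((PySem.List.pyRange p (pvHeadKey rest total_pages) 1).foldl
          (fun d page => d.insert page a) d)

-- A's enumerate loop with the points[i+1] peek equals the structural recursion, on any suffix
theorem pvA_fold (P : List (Int × List (String × String))) (total_pages : Int) :
    ∀ (s : List (Int × List (String × String))) (k : Nat)
      (d : PySem.Dict Int (List (String × String))), P.drop k = s →
    (PySem.List.enumerate s (k : Int)).foldl
      (fun (d : PySem.Dict Int (List (String × String))) ip =>
        let end_page : Int :=
          if ip.1 < (P.length : Int) - 1 then
            (PySem.List.pyGetD P (ip.1 + 1) ((0 : Int), [])).1 - 1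
          else total_pages
        (PySem.List.pyRange ip.2.1 (end_page + 1) 1).foldl
          (fun d page => d.insert page ip.2.2) d) d
    = pvFoldIns s total_pages d := by
  intro s
  induction s with
  | nil => intro k d _; simp [PySem.List.enumerate, pvFoldIns]
  | cons x rest ih =>
      intro k d hdrop
      obtain ⟨p, a⟩ := x
      have hk : k < P.length := by
        by_contra h
        simp [List.drop_eq_nil_of_le (Nat.le_of_not_lt h)] at hdrop
      have hdrop' : P.drop (k + 1) = rest := by
        rw [← List.tail_drop, hdrop]
        rfl
      rw [PySem.List.enumerate_cons, List.foldl_cons]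
      have hidx : PySem.List.pyGetD P ((k : Int) + 1) ((0 : Int), []) = P.getD (k + 1) ((0 : Int), []) := by
        have := PySem.List.pyGetD_natCast P (k + 1) ((0 : Int), [])
        push_cast at this
        exact this
      have hguard : ((k : Int) < (P.length : Int) - 1) ↔ rest ≠ [] := by
        constructor
        · intro h hnil
          rw [hnil] at hdrop
          have : P.length = k + 1 := by
            have := congrArg List.length hdrop
            simp at this
            omega
          omega
        · intro h
          have : 1 ≤ rest.length := by
            cases rest with
            | nil => exact absurd rfl h
            | cons y ys => simp
          have hlen := congrArg List.length hdrop
          simp at hlen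
          omega
      cases rest with
      | nil =>
          simp only [pvFoldIns, pvHeadKey]
          have : ¬ ((k : Int) < (P.length : Int) - 1) := by
            intro h; exact (hguard.1 h) rfl
          simp only [this, if_false]
          exact ih (k + 1) _ hdrop'
      | cons y ys =>
          simp only [pvFoldIns, pvHeadKey]
          have hg : ((k : Int) < (P.length : Int) - 1) := hguard.2 (by simp)
          have hget : P.getD (k + 1) ((0 : Int), []) = y := by
            have : P.drop (k + 1) = y :: ys := hdrop'
            have hlt : k + 1 < P.length := by
              have := congrArg List.length this
              simp at this
              omega
            rw [List.getD_eq_getElem _ _ hlt]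
            have := congrArg (fun l => l.head?) this
            simpa [List.head?_drop, List.getElem?_eq_getElem hlt] using this
          simp only [hg, if_true, hidx, hget]
          have harith : y.1 - 1 + 1 = y.1 := by omega
          rw [harith]
          exact ih (k + 1) _ hdrop'

-- the structural recursion is a single insert loop over the blocks
theorem pvFoldIns_eq_foldl (pts : List (Int × List (String × String))) (total_pages : Int) :
    ∀ d, pvFoldIns pts total_pages d
      = (pvBlocks pts total_pages).foldl (fun d pr => d.insert pr.1 pr.2) d := by
  induction pts with
  | nil => intro d; simp [pvFoldIns, pvBlocks]
  | cons x rest ih =>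
      intro d
      obtain ⟨p, a⟩ := x
      simp only [pvFoldIns, pvBlocks, List.foldl_append, List.foldl_map, ih]

-- ===== VERDICT (by name: the statement is the Claim_ definition above) =====
theorem calculate_cascading_assignments_spec : Claim_equal_calculate_cascading_assignments := by
  intro page_assignments total_pages _
  unfold Spec_calculate_cascading_assignments
  unfold calculate_cascading_assignments calculate_cascading_assignments_alt
  by_cases h : page_assignments = []
  · simp [h]
  · simp only [h, if_false]
    set pts := (if (PySem.List.pyGetD (PySem.List.sorted page_assignments (fun p => p.1)) 0 ((0 : Int), [])).1 > 1 then
        PySem.List.insert (PySem.List.sorted page_assignments (fun p => p.1)) 0 ((1 : Int), pvDefaultAssignment)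
      else PySem.List.sorted page_assignments (fun p => p.1)) with hpts
    -- A side: the enumerate loop is the structural recursion, i.e. one insert loop over pvBlocks
    have hA := pvA_fold pts total_pages pts 0 PySem.Dict.empty (by simp)
    simp only [Nat.cast_zero] at hA
    rw [hA, pvFoldIns_eq_foldl]
    -- B side: the reverse fold accumulates exactly pvBlocks, and dict() of it is the same insert loop
    rw [pvB_fold pts total_pages]
    show _ = (PySem.Dict.ofList ((pvBlockList pts total_pages).reverse.reverse.flatten)).items
    rw [List.reverse_reverse, pvBlockList_flatten]
    rfl
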